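-- pv_equiv track=rewrite | github.com/namelessgamingco/poker-tracker | test_component.py | parse_board_cards
-- ===== SOURCE A (Python) =====
-- def parse_board_cards(board_str):
--     """Parse board string like 'Kd7c2h' into list of (rank, suit) tuples."""
--     cards = []
--     if not board_str:
--         return cards
--     i = 0
--     while i < len(board_str) - 1:
--         rank = board_str[i].upper()
--         suit = board_str[i + 1].lower()
--         cards.append((rank, suit))
--         i += 2
--     return cards
-- ===== SOURCE B (Python) =====
-- def parse_board_cards(board_str):
--     """Parse board string like 'Kd7c2h' into list of (rank, suit) tuples."""
--     ranks = board_str[::2].upper()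
--     suits = board_str[1::2].lower()
--     return list(zip(ranks, suits))
-- ===== Notes on version B (the rewrite author's own statement) =====
-- stated objective: faster
-- what changed: Replaced A's Python-level index-stepping pairing loop (append accumulator, per-pair upper/lower) by three staged whole-string passes done by C-level string primitives: slice out the rank strand board_str[::2] and uppercase it as a whole, slice the suit strand board_str[1::2] and lowercase it as a whole, then zip the two strands (zip truncation reproduces dropping a trailing unpaired character).
import Mathlib
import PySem

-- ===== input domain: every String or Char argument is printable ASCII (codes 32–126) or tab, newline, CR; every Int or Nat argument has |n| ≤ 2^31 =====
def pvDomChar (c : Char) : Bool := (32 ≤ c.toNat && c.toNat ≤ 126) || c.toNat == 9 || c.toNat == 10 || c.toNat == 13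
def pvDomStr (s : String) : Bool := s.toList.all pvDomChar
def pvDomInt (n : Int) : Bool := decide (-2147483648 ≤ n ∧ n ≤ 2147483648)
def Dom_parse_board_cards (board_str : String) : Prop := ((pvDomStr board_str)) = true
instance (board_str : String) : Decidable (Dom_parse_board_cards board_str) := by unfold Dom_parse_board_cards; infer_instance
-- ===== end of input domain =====

-- B replaces A's index-stepping pairing loop by three staged whole-string passes: the rank
-- strand board_str[::2] uppercased as a whole, the suit strand board_str[1::2] lowercased as
-- a whole, then the two strands zipped; same O(n) cost, a different decomposition.

-- ===== PORT A =====
-- while i < len(board_str) - 1: append (board_str[i].upper(), board_str[i+1].lower()); i += 2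
def pvGoA (cs : List Char) (i : Nat) (acc : List (String × String)) : List (String × String) :=
  if h : i + 1 < cs.length then
    pvGoA cs (i + 2)
      (acc ++ [(String.ofList [PySem.Chars.upperChar (cs[i]'(by omega))],
                String.ofList [PySem.Chars.lowerChar (cs[i + 1]'h)])])
  else acc
termination_by cs.length - i

def parse_board_cards (board_str : String) : List (String × String) :=
  let cards : List (String × String) := []
  if board_str.toList.isEmpty then cards
  else pvGoA board_str.toList 0 cards

-- ===== PORT B =====
-- ranks = board_str[::2].upper(); suits = board_str[1::2].lower(); list(zip(ranks, suits))
-- (slice? never returns none for the literal step 2; .getD "" is only a totality guard)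
def parse_board_cards_alt (board_str : String) : List (String × String) :=
  let ranks := PySem.Str.upper ((PySem.Str.slice? board_str none none 2).getD "")
  let suits := PySem.Str.lower ((PySem.Str.slice? board_str (some 1) none 2).getD "")
  List.zipWith (fun r s => (String.ofList [r], String.ofList [s])) ranks.toList suits.toList

-- ===== PRECONDITION & SPEC =====
def Spec_parse_board_cards (board_str : String) (out : List (String × String)) : Prop := out = parse_board_cards_alt board_str
instance (board_str : String) (out : List (String × String)) : Decidable (Spec_parse_board_cards board_str out) := by unfold Spec_parse_board_cards; infer_instance

-- ===== CLAIM (what is proved, stated in full; the proofs are below) =====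
def Claim_equal_parse_board_cards : Prop := ∀ (board_str : String), Dom_parse_board_cards board_str → Spec_parse_board_cards board_str (parse_board_cards board_str)

-- ===== LEMMAS AND PROOFS =====

-- every second element of a list, starting at index 0
def pvEvens {α : Type} : List α → List α
  | [] => []
  | [a] => [a]
  | a :: _ :: t => a :: pvEvens t

lemma pvEvens_cons {α : Type} (a : α) (t : List α) :
    pvEvens (a :: t) = a :: pvEvens t.tail := by
  cases t <;> rfl

-- the even-position strand written as Python's slice machinery computes it
lemma pv_filterMap_stride {α : Type} (xs : List α) :
    List.filterMap (fun k : Nat => xs[2 * k]?) (List.range ((xs.length + 1) / 2)) = pvEvens xs := by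
  fun_induction pvEvens xs with
  | case1 => simp
  | case2 a => simp
  | case3 a b t ih =>
      have hc : ((a :: b :: t).length + 1) / 2 = ((t.length + 1) / 2) + 1 := by simp; omega
      rw [hc, List.range_succ_eq_map, List.filterMap_cons, List.filterMap_map]
      have hf : ∀ k ∈ List.range ((t.length + 1) / 2),
          ((fun k : Nat => (a :: b :: t)[2 * k]?) ∘ (· + 1)) k = (fun k : Nat => t[2 * k]?) k := by
        intro k _
        show (a :: b :: t)[2 * (k + 1)]? = t[2 * k]?
        have h2 : 2 * (k + 1) = 2 * k + 1 + 1 := by omega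
        rw [h2, List.getElem?_cons_succ, List.getElem?_cons_succ]
      rw [List.filterMap_congr hf, ih]
      rfl

lemma pv_filterMap_stride' {α : Type} (xs : List α) (c : Nat) (hc : c = (xs.length + 1) / 2) :
    List.filterMap (fun k : Nat => xs[((2:ℤ) * (k:ℤ)).toNat]?) (List.range c) = pvEvens xs := by
  subst hc
  rw [List.filterMap_congr (g := fun k : Nat => xs[2 * k]?) ?_, pv_filterMap_stride]
  intro k _
  have h : ((2:ℤ) * (k:ℤ)).toNat = 2 * k := by omega
  rw [h]

lemma pv_stride_odd {α : Type} (a : α) (t : List α) (c : Nat) (hc : c = (t.length + 1) / 2) :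
    List.filterMap (fun k : Nat => (a :: t)[((1:ℤ) + 2 * (k:ℤ)).toNat]?) (List.range c) = pvEvens t := by
  subst hc
  rw [List.filterMap_congr (g := fun k : Nat => t[2 * k]?) ?_, pv_filterMap_stride]
  intro k _
  have h : ((1:ℤ) + 2 * (k:ℤ)).toNat = 2 * k + 1 := by omega
  rw [h, List.getElem?_cons_succ]

lemma pv_slice_step2 {α : Type} (xs : List α) :
    PySem.List.slice? xs none none 2 = some (pvEvens xs) := by
  unfold PySem.List.slice? PySem.List.sliceIndices
  norm_num
  rw [pv_filterMap_stride' xs _ (by split_ifs with h <;> omega)]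

lemma pv_slice_from1_step2 {α : Type} (xs : List α) :
    PySem.List.slice? xs (some 1) none 2 = some (pvEvens xs.tail) := by
  unfold PySem.List.slice? PySem.List.sliceIndices
  norm_num
  cases xs with
  | nil => simp [pvEvens]
  | cons a t =>
      have hmin : min (1:ℤ) ((a :: t).length : ℤ) = 1 := by simp
      rw [hmin, List.tail_cons,
        pv_stride_odd a t _ (by simp only [List.length_cons]; split_ifs with h <;> omega)]

-- A's pairing loop as a two-at-a-time recursion
def pvPairs : List Char → List (String × String)
  | r :: su :: rest =>
      (String.ofList [PySem.Chars.upperChar r], String.ofList [PySem.Chars.lowerChar su]) :: pvPairs rest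
  | _ => []

lemma pvGoA_eq (cs : List Char) (i : Nat) (acc : List (String × String)) :
    pvGoA cs i acc = acc ++ pvPairs (cs.drop i) := by
  fun_induction pvGoA cs i acc with
  | case1 i acc h ih =>
      have h1 : i < cs.length := by omega
      have hd : cs.drop i = cs[i] :: cs[i + 1] :: cs.drop (i + 2) := by
        rw [List.drop_eq_getElem_cons h1, List.drop_eq_getElem_cons h]
      rw [ih, hd]
      simp [pvPairs]
  | case2 i acc h =>
      have : (cs.drop i).length ≤ 1 := by simp; omega
      match hm : cs.drop i with
      | [] => simp [pvPairs]
      | [c] => simp [pvPairs]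
      | a :: b :: t => rw [hm] at this; simp at this

-- zipping the transformed strands is A's pairing
lemma pv_zip_strands (l : List Char) :
    List.zipWith (fun r s => (String.ofList [r], String.ofList [s]))
      (List.map PySem.Chars.upperChar (pvEvens l))
      (List.map PySem.Chars.lowerChar (pvEvens l.tail)) = pvPairs l := by
  fun_induction pvPairs l with
  | case1 r su rest ih =>
      have h1 : pvEvens (r :: su :: rest) = r :: pvEvens rest := rfl
      have h2 : pvEvens (r :: su :: rest).tail = su :: pvEvens rest.tail := pvEvens_cons su rest
      rw [h1, h2]
      simp only [List.map_cons, List.zipWith_cons_cons, ih]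
  | case2 l h =>
      match l with
      | [] => rfl
      | [a] => rfl
      | a :: b :: t => exact absurd rfl (h a b t)

-- ===== VERDICT (by name: the statement is the Claim_ definition above) =====
theorem parse_board_cards_spec : Claim_equal_parse_board_cards := by
  intro s _
  unfold Spec_parse_board_cards parse_board_cards parse_board_cards_alt
  simp only [PySem.Str.slice?, PySem.Chars.slice?_eq_listSlice?,
    pv_slice_step2, pv_slice_from1_step2, Option.map_some, Option.getD_some]
  have hu : (PySem.Str.upper (String.ofList (pvEvens s.toList))).toList
      = List.map PySem.Chars.upperChar (pvEvens s.toList) := by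
    rw [PySem.Str.toList_upper]; simp [PySem.Chars.upper]
  have hl : (PySem.Str.lower (String.ofList (pvEvens s.toList.tail))).toList
      = List.map PySem.Chars.lowerChar (pvEvens s.toList.tail) := by
    rw [PySem.Str.toList_lower]; simp [PySem.Chars.lower]
  rw [hu, hl, pv_zip_strands]
  by_cases h : s.toList.isEmpty
  · simp only [h, if_true]
    rw [List.isEmpty_iff] at h
    simp [h, pvPairs]
  · simp [h, pvGoA_eq]
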